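-- pv_equiv track=rewrite | github.com/70137131-jpg/tictic | train_improved_agent.py | get_symmetric_states
-- ===== SOURCE A (Python) =====
-- def get_symmetric_states(board):
--     """
--     Generate all 8 symmetric states (4 rotations + 4 reflections)
--     This allows the agent to learn from symmetrically equivalent positions
--     """
--     states = []
--
--     # Original
--     states.append([row[:] for row in board])
--
--     # 90° rotation
--     rot90 = [[board[2-j][i] for j in range(3)] for i in range(3)]
--     states.append(rot90)
--
--     # 180° rotation
--     rot180 = [[board[2-i][2-j] for j in range(3)] for i in range(3)]
--     states.append(rot180)
--
--     # 270° rotation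
--     rot270 = [[board[j][2-i] for j in range(3)] for i in range(3)]
--     states.append(rot270)
--
--     # Horizontal flip
--     h_flip = [[board[i][2-j] for j in range(3)] for i in range(3)]
--     states.append(h_flip)
--
--     # Vertical flip
--     v_flip = [[board[2-i][j] for j in range(3)] for i in range(3)]
--     states.append(v_flip)
--
--     # Diagonal flip (main)
--     d_flip1 = [[board[j][i] for j in range(3)] for i in range(3)]
--     states.append(d_flip1)
--
--     # Diagonal flip (anti)
--     d_flip2 = [[board[2-j][2-i] for j in range(3)] for i in range(3)]
--     states.append(d_flip2)
--
--     return states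
-- ===== SOURCE B (Python) =====
-- def rotate90(b):
--     return [[b[2 - j][i] for j in range(3)] for i in range(3)]
--
--
-- def hflip(b):
--     return [[b[i][2 - j] for j in range(3)] for i in range(3)]
--
--
-- def get_symmetric_states(board):
--     orig = [row[:] for row in board]
--     r90 = rotate90(board)
--     r180 = rotate90(r90)
--     r270 = rotate90(r180)
--     h = hflip(board)
--     return [orig, r90, r180, r270,
--             h, rotate90(rotate90(h)), rotate90(rotate90(rotate90(h))), rotate90(h)]
-- ===== Notes on version B (the rewrite author's own statement) =====
-- stated objective: simpler
-- what changed: Replaces the eight hard-coded index-formula comprehensions with two primitive transforms (rotate90, hflip) composed to generate all eight symmetries in A's exact order.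
import Mathlib
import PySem

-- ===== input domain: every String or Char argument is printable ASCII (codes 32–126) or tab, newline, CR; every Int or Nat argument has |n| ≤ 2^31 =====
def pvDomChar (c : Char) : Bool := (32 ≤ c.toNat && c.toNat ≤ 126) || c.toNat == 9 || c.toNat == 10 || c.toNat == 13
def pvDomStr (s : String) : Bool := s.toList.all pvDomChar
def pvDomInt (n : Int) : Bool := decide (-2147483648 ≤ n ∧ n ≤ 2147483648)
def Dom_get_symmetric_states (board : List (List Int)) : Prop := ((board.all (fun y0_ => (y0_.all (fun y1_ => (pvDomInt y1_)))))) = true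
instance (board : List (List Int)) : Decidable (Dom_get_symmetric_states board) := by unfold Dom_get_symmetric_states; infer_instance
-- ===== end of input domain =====

-- B replaces A's eight hard-coded index-formula grids with two primitive transforms
-- (rotate90, hflip) composed to produce the same eight states in the same order (objective: simpler).


-- ===== PORT A =====
-- board[i][j], total form; exact on indices admitted by Pre_ (all indices used are 0..2, in range there)
def pvCell (b : List (List Int)) (i j : Int) : Int :=
  PySem.List.pyGetD (PySem.List.pyGetD b i []) j 0

def get_symmetric_states (board : List (List Int)) : List (List (List Int)) :=
  let orig := board.map (fun row => PySem.List.slice row none none)   -- row[:]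
  let rot90 := (PySem.List.pyRange 0 3 1).map (fun i =>
    (PySem.List.pyRange 0 3 1).map (fun j => pvCell board (2 - j) i))
  let rot180 := (PySem.List.pyRange 0 3 1).map (fun i =>
    (PySem.List.pyRange 0 3 1).map (fun j => pvCell board (2 - i) (2 - j)))
  let rot270 := (PySem.List.pyRange 0 3 1).map (fun i =>
    (PySem.List.pyRange 0 3 1).map (fun j => pvCell board j (2 - i)))
  let h_flip := (PySem.List.pyRange 0 3 1).map (fun i =>
    (PySem.List.pyRange 0 3 1).map (fun j => pvCell board i (2 - j)))
  let v_flip := (PySem.List.pyRange 0 3 1).map (fun i =>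
    (PySem.List.pyRange 0 3 1).map (fun j => pvCell board (2 - i) j))
  let d_flip1 := (PySem.List.pyRange 0 3 1).map (fun i =>
    (PySem.List.pyRange 0 3 1).map (fun j => pvCell board j i))
  let d_flip2 := (PySem.List.pyRange 0 3 1).map (fun i =>
    (PySem.List.pyRange 0 3 1).map (fun j => pvCell board (2 - j) (2 - i)))
  [orig, rot90, rot180, rot270, h_flip, v_flip, d_flip1, d_flip2]

-- ===== PORT B =====
def pvRotate90 (b : List (List Int)) : List (List Int) :=
  (PySem.List.pyRange 0 3 1).map (fun i =>
    (PySem.List.pyRange 0 3 1).map (fun j => pvCell b (2 - j) i))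

def pvHflip (b : List (List Int)) : List (List Int) :=
  (PySem.List.pyRange 0 3 1).map (fun i =>
    (PySem.List.pyRange 0 3 1).map (fun j => pvCell b i (2 - j)))

def get_symmetric_states_alt (board : List (List Int)) : List (List (List Int)) :=
  let orig := board.map (fun row => PySem.List.slice row none none)
  let r90 := pvRotate90 board
  let r180 := pvRotate90 r90
  let r270 := pvRotate90 r180
  let h := pvHflip board
  [orig, r90, r180, r270,
   h, pvRotate90 (pvRotate90 h), pvRotate90 (pvRotate90 (pvRotate90 h)), pvRotate90 h]

-- ===== PRECONDITION & SPEC =====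
-- Pre_ excludes exactly the boards on which A raises IndexError: fewer than 3 rows,
-- or one of the first 3 rows shorter than 3.
def Pre_get_symmetric_states (board : List (List Int)) : Prop :=
  3 ≤ board.length ∧ ∀ r ∈ board.take 3, 3 ≤ r.length
instance (board : List (List Int)) : Decidable (Pre_get_symmetric_states board) := by
  unfold Pre_get_symmetric_states; infer_instance

def pvWitness_get_symmetric_states : List (List Int) :=
  [[1, 2, 3], [4, 5, 6], [7, 8, 9]]

def Spec_get_symmetric_states (board : List (List Int)) (out : List (List (List Int))) : Prop := out = get_symmetric_states_alt board
instance (board : List (List Int)) (out : List (List (List Int))) : Decidable (Spec_get_symmetric_states board out) := by unfold Spec_get_symmetric_states; infer_instance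

-- ===== CLAIM (what is proved, stated in full; the proofs are below) =====
def Claim_equal_get_symmetric_states : Prop := ∀ (board : List (List Int)), Dom_get_symmetric_states board → Pre_get_symmetric_states board → Spec_get_symmetric_states board (get_symmetric_states board)

-- ===== LEMMAS AND PROOFS =====

-- ===== VERDICT (by name: the statement is the Claim_ definition above) =====
theorem get_symmetric_states_spec : Claim_equal_get_symmetric_states := by
  intro board _ hpre
  obtain ⟨hlen, hrows⟩ := hpre
  match board, hlen with
  | (r0 :: r1 :: r2 :: rest), _ =>
    have h0 : 3 ≤ r0.length := hrows r0 (by simp)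
    have h1 : 3 ≤ r1.length := hrows r1 (by simp)
    have h2 : 3 ≤ r2.length := hrows r2 (by simp)
    match r0, h0, r1, h1, r2, h2 with
    | (a :: b :: c :: t0), _, (d :: e :: f :: t1), _, (g :: h :: i :: t2), _ =>
      simp [Spec_get_symmetric_states, get_symmetric_states, get_symmetric_states_alt,
            pvRotate90, pvHflip, pvCell,
            show PySem.List.pyRange 0 3 1 = [0, 1, 2] from rfl,
            PySem.List.pyGetD_ofNat', PySem.List.slice_none_none, List.getD]
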